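-- pv_equiv track=rewrite | github.com/wasmbenchpaper/wasmbenchpaper | charts/create_charts.py | get_workload_and_lang
-- ===== SOURCE A (Python) =====
-- from typing import Dict, List, Tuple
--
-- def get_workload_and_lang(workload_name: str) -> Tuple[str, str]:
--     languages = ["c", "go", "py", "rust"]
--     workloads = ["sort", "copyfile", "sudoku", "graph", "fileserver", "without", "simd"]
--
--     curr_lang = None
--     for l in languages:
--         if "-" + l + "-" in workload_name or workload_name.startswith(l + "-"):
--             curr_lang = l
--             break
--     curr_work = None
--     for w in workloads:
--         if (
--             "-" + w + "-" in workload_name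
--             or workload_name.startswith(w + "-")
--             or workload_name.endswith("-" + w)
--         ):
--             curr_work = w
--             break
--     return curr_work, curr_lang
-- ===== SOURCE B (Python) =====
-- from typing import Tuple
--
-- def get_workload_and_lang(workload_name: str) -> Tuple[str, str]:
--     languages = ["c", "go", "py", "rust"]
--     workloads = ["sort", "copyfile", "sudoku", "graph", "fileserver", "without", "simd"]
--
--     tokens = workload_name.split("-")
--     # a language must be a token followed by a dash: any token except the last
--     curr_lang = next((l for l in languages if l in tokens[:-1]), None)
--     # a workload must be a token adjacent to a dash: any token, provided a dash exists
--     curr_work = next((w for w in workloads if w in tokens), None) if len(tokens) > 1 else None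
--     return curr_work, curr_lang
-- ===== Notes on version B (the rewrite author's own statement) =====
-- stated objective: simpler
-- what changed: B splits the name into dash-separated tokens once and tests token membership (tokens[:-1] for languages, any token with len(tokens)>1 for workloads) instead of A's three per-candidate dash-decorated substring tests.
import Mathlib
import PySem

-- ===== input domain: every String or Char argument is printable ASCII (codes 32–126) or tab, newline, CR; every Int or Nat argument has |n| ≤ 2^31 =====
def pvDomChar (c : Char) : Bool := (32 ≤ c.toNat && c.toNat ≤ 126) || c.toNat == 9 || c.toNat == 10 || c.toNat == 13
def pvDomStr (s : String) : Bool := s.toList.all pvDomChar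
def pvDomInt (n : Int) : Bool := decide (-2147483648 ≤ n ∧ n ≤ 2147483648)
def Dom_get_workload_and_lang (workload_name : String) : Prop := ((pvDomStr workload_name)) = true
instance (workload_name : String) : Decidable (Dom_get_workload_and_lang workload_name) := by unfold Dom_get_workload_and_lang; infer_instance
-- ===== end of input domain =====

-- B replaces A's per-candidate substring tests ("-l-" in s / startswith / endswith) by splitting the
-- name into dash-separated tokens once and testing token membership (objective: simpler).

-- ===== PORT A =====
-- literal port of A: scan the hardcoded lists, first hit wins (the for/break loop is List.find?);
-- the three substring tests are PySem.Chars.isIn / startswith / endswith on the code points.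
def get_workload_and_lang (workload_name : String) : Option String × Option String :=
  let s := workload_name.toList
  let languages := ["c", "go", "py", "rust"]
  let workloads := ["sort", "copyfile", "sudoku", "graph", "fileserver", "without", "simd"]
  let curr_lang := languages.find? (fun l =>
    PySem.Chars.isIn ('-' :: (l.toList ++ ['-'])) s || PySem.Chars.startswith s (l.toList ++ ['-']))
  let curr_work := workloads.find? (fun w =>
    PySem.Chars.isIn ('-' :: (w.toList ++ ['-'])) s || PySem.Chars.startswith s (w.toList ++ ['-'])
      || PySem.Chars.endswith s ('-' :: w.toList))
  (curr_work, curr_lang)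

-- ===== PORT B =====
-- literal port of Source B: tokens = workload_name.split('-') (PySem.Chars.splitOn), languages checked
-- against tokens[:-1] (PySem.List.slice … (-1)), workloads against tokens guarded by len(tokens) > 1.
def get_workload_and_lang_alt (workload_name : String) : Option String × Option String :=
  let languages := ["c", "go", "py", "rust"]
  let workloads := ["sort", "copyfile", "sudoku", "graph", "fileserver", "without", "simd"]
  let tokens := PySem.Chars.splitOn workload_name.toList ['-']
  let curr_lang := languages.find? (fun l => (PySem.List.slice tokens none (some (-1))).contains l.toList)
  let curr_work := if 1 < tokens.length then workloads.find? (fun w => tokens.contains w.toList) else none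
  (curr_work, curr_lang)

-- ===== PRECONDITION & SPEC =====
def Spec_get_workload_and_lang (workload_name : String) (out : Option String × Option String) : Prop := out = get_workload_and_lang_alt workload_name
instance (workload_name : String) (out : Option String × Option String) : Decidable (Spec_get_workload_and_lang workload_name out) := by unfold Spec_get_workload_and_lang; infer_instance

-- ===== CLAIM (what is proved, stated in full; the proofs are below) =====
def Claim_equal_get_workload_and_lang : Prop := ∀ (workload_name : String), Dom_get_workload_and_lang workload_name → Spec_get_workload_and_lang workload_name (get_workload_and_lang workload_name)

-- ===== LEMMAS AND PROOFS =====

-- PySem's fueled splitOn with a one-character separator is core List.splitOn.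
theorem pvGoSpec (d : Char) (fuel : Nat) : ∀ (l cur : List Char) (acc : List (List Char)),
    l.length ≤ fuel →
    PySem.Chars.splitOn.go [d] fuel l cur acc
      = acc.reverse ++ (List.splitOn d l).modifyHead (fun t => cur.reverse ++ t) := by
  induction fuel with
  | zero =>
    intro l cur acc h
    have hl : l = [] := List.eq_nil_of_length_eq_zero (Nat.le_zero.mp h)
    subst hl
    simp [PySem.Chars.splitOn.go, List.splitOn, List.splitOnP_nil]
  | succ n ih =>
    intro l cur acc h
    cases l with
    | nil => simp [PySem.Chars.splitOn.go, List.splitOn, List.splitOnP_nil]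
    | cons c rest =>
      obtain ⟨h0, t0, hsp⟩ : ∃ h0 t0, List.splitOnP (fun x => x == d) rest = h0 :: t0 := by
        cases hx : List.splitOnP (fun x => x == d) rest with
        | nil => exact absurd hx (List.splitOnP_ne_nil _ _)
        | cons a b => exact ⟨a, b, rfl⟩
      by_cases hc : d = c
      · subst hc
        have hrw : PySem.Chars.splitOn.go [d] (n+1) (d :: rest) cur acc
            = PySem.Chars.splitOn.go [d] n rest [] (cur.reverse :: acc) := by
          simp [PySem.Chars.splitOn.go, List.isPrefixOf]
        rw [hrw, ih rest [] (cur.reverse :: acc) (by simpa using Nat.le_of_succ_le_succ h)]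
        simp [List.splitOn, List.splitOnP_cons, hsp, List.modifyHead]
      · have hrw : PySem.Chars.splitOn.go [d] (n+1) (c :: rest) cur acc
            = PySem.Chars.splitOn.go [d] n rest (c :: cur) acc := by
          simp [PySem.Chars.splitOn.go, List.isPrefixOf, hc]
        rw [hrw, ih rest (c :: cur) acc (by simpa using Nat.le_of_succ_le_succ h)]
        have hcd : (c == d) = false := by simp [Ne.symm hc]
        simp [List.splitOn, List.splitOnP_cons, hcd, hsp, List.modifyHead]

theorem pvSplitOnEq (s : List Char) (d : Char) :
    PySem.Chars.splitOn s [d] = List.splitOn d s := by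
  unfold PySem.Chars.splitOn
  rw [pvGoSpec d (s.length + 1) s [] [] (by omega)]
  cases hx : List.splitOn d s with
  | nil => simp
  | cons a b => simp

theorem pvSliceDropLast (xs : List (List Char)) :
    PySem.List.slice xs none (some (-1)) = xs.dropLast := by
  simp [PySem.List.slice]
  exact List.dropLast_eq_take.symm

-- splitOn across an explicit separator
theorem pvSplitOn_append (a r : List Char) :
    List.splitOn '-' (a ++ '-' :: r) = List.splitOn '-' a ++ List.splitOn '-' r := by
  induction a with
  | nil => simp [List.splitOn, List.splitOnP_cons, List.splitOnP_nil]
  | cons c a' ih =>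
    by_cases hc : c = '-'
    · subst hc
      simp only [List.splitOn, List.cons_append, List.splitOnP_cons, beq_self_eq_true, if_pos]
      simp only [List.splitOn] at ih
      simp [ih]
    · obtain ⟨h0, t0, hsp⟩ : ∃ h0 t0, List.splitOnP (fun x => x == '-') a' = h0 :: t0 := by
        cases hx : List.splitOnP (fun x => x == '-') a' with
        | nil => exact absurd hx (List.splitOnP_ne_nil _ _)
        | cons u v => exact ⟨u, v, rfl⟩
      simp only [List.splitOn, List.cons_append, List.splitOnP_cons] at ih ⊢
      rw [ih]
      simp [hc, hsp, List.modifyHead]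

theorem pvSplitOn_single (t : List Char) (h : '-' ∉ t) : List.splitOn '-' t = [t] := by
  induction t with
  | nil => simp [List.splitOn, List.splitOnP_nil]
  | cons c t' ih =>
    have hc : ¬ (c = '-') := fun hcc => h (hcc ▸ List.mem_cons_self ..)
    have h' : '-' ∉ t' := fun hm => h (List.mem_cons_of_mem _ hm)
    simp only [List.splitOn, List.splitOnP_cons] at ih ⊢
    rw [ih h']
    simp [hc, List.modifyHead]

theorem pvMemDropLast {α : Type} (l : List α) (t : α) :
    t ∈ l.dropLast ↔ ∃ X Y, l = X ++ t :: Y ∧ Y ≠ [] := by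
  constructor
  · intro h
    have hne : l ≠ [] := by rintro rfl; simp at h
    obtain ⟨X, Y', hXY⟩ := List.append_of_mem h
    refine ⟨X, Y' ++ [l.getLast hne], ?_, by simp⟩
    conv_lhs => rw [← List.dropLast_append_getLast hne]
    rw [hXY]
    simp
  · rintro ⟨X, Y, rfl, hY⟩
    have h1 : (X ++ t :: Y).dropLast = X ++ (t :: Y).dropLast :=
      List.dropLast_append_of_ne_nil (List.cons_ne_nil t Y)
    have h2 : (t :: Y).dropLast = t :: Y.dropLast := by
      cases Y with
      | nil => exact absurd rfl hY
      | cons y ys => simp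
    rw [h1, h2]
    simp

theorem pvInter_cons₂ (x y : List Char) (L : List (List Char)) :
    ['-'].intercalate (x :: y :: L) = x ++ '-' :: ['-'].intercalate (y :: L) := by
  simp [List.intercalate, List.intersperse]

theorem pvInterMid (X : List (List Char)) : ∀ (x t : List Char) (Y : List (List Char)), Y ≠ [] →
    ∃ a b, ['-'].intercalate ((x :: X) ++ t :: Y) = a ++ ('-' :: t ++ '-' :: b) := by
  induction X with
  | nil =>
    intro x t Y hY
    cases Y with
    | nil => exact absurd rfl hY
    | cons y Y' =>
      refine ⟨x, ['-'].intercalate (y :: Y'), ?_⟩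
      have h1 : ([x] ++ t :: y :: Y') = x :: t :: y :: Y' := by simp
      rw [h1, pvInter_cons₂, pvInter_cons₂]
      simp
  | cons z X' ih =>
    intro x t Y hY
    obtain ⟨a, b, hab⟩ := ih z t Y hY
    refine ⟨x ++ '-' :: a, b, ?_⟩
    have h1 : (x :: z :: X') ++ t :: Y = x :: z :: (X' ++ t :: Y) := by simp
    have h2 : z :: (X' ++ t :: Y) = (z :: X') ++ t :: Y := by simp
    rw [h1, pvInter_cons₂, h2, hab]
    simp

theorem pvInterLast (X : List (List Char)) : ∀ (x t : List Char),
    ∃ a, ['-'].intercalate ((x :: X) ++ [t]) = a ++ '-' :: t := by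
  induction X with
  | nil =>
    intro x t
    refine ⟨x, ?_⟩
    have h1 : ([x] ++ [t] : List (List Char)) = x :: t :: ([] : List (List Char)) := by simp
    rw [h1, pvInter_cons₂]
    simp [List.intercalate, List.intersperse]
  | cons z X' ih =>
    intro x t
    obtain ⟨a, ha⟩ := ih z t
    refine ⟨x ++ '-' :: a, ?_⟩
    have h1 : (x :: z :: X') ++ [t] = x :: z :: (X' ++ [t]) := by simp
    have h2 : z :: (X' ++ [t]) = (z :: X') ++ [t] := by simp
    rw [h1, pvInter_cons₂, h2, ha]
    simp

-- token-membership characterisation of A's substring tests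
theorem pvSplitOn_ne_nil (s : List Char) : List.splitOn '-' s ≠ [] := by
  simpa [List.splitOn] using List.splitOnP_ne_nil (fun x => x == '-') s

theorem pvFormsLang (t : List Char) (hd : '-' ∉ t) (s : List Char) :
    (('-' :: (t ++ ['-'])) <:+: s ∨ (t ++ ['-']) <+: s)
      ↔ t ∈ (List.splitOn '-' s).dropLast := by
  constructor
  · rintro (hinf | hpre)
    · obtain ⟨a, b, hab⟩ := hinf
      have hs : s = a ++ '-' :: (t ++ '-' :: b) := by
        rw [← hab]; simp
      rw [hs, pvSplitOn_append, pvSplitOn_append, pvSplitOn_single t hd]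
      rw [pvMemDropLast]
      exact ⟨List.splitOn '-' a, List.splitOn '-' b, by simp, pvSplitOn_ne_nil b⟩
    · obtain ⟨r, hr⟩ := hpre
      have hs : s = t ++ '-' :: r := by rw [← hr]; simp
      rw [hs, pvSplitOn_append, pvSplitOn_single t hd]
      rw [pvMemDropLast]
      exact ⟨[], List.splitOn '-' r, by simp, pvSplitOn_ne_nil r⟩
  · intro h
    rw [pvMemDropLast] at h
    obtain ⟨X, Y, hXY, hY⟩ := h
    have hs : s = ['-'].intercalate (X ++ t :: Y) := by
      rw [← hXY]
      exact (List.intercalate_splitOn s '-').symm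
    cases X with
    | nil =>
      cases Y with
      | nil => exact absurd rfl hY
      | cons y Y' =>
        refine Or.inr ⟨['-'].intercalate (y :: Y'), ?_⟩
        rw [hs]
        have h1 : (([] : List (List Char)) ++ t :: y :: Y') = t :: y :: Y' := by simp
        rw [h1, pvInter_cons₂]
        simp
    | cons x X' =>
      obtain ⟨a, b, hab⟩ := pvInterMid X' x t Y hY
      refine Or.inl ⟨a, b, ?_⟩
      rw [hs, hab]
      simp

theorem pvFormsWork (t : List Char) (hd : '-' ∉ t) (s : List Char) :
    (('-' :: (t ++ ['-'])) <:+: s ∨ (t ++ ['-']) <+: s ∨ ('-' :: t) <:+ s)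
      ↔ (1 < (List.splitOn '-' s).length ∧ t ∈ List.splitOn '-' s) := by
  constructor
  · rintro (hinf | hpre | hsuf)
    · obtain ⟨a, b, hab⟩ := hinf
      have hs : s = a ++ '-' :: (t ++ '-' :: b) := by rw [← hab]; simp
      rw [hs, pvSplitOn_append, pvSplitOn_append, pvSplitOn_single t hd]
      have ha := List.length_pos_of_ne_nil (pvSplitOn_ne_nil a)
      constructor
      · simp only [List.length_append, List.length_cons]
        omega
      · simp
    · obtain ⟨r, hr⟩ := hpre
      have hs : s = t ++ '-' :: r := by rw [← hr]; simp
      rw [hs, pvSplitOn_append, pvSplitOn_single t hd]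
      have hr' := List.length_pos_of_ne_nil (pvSplitOn_ne_nil r)
      constructor
      · simp only [List.length_append, List.length_cons]
        omega
      · simp
    · obtain ⟨a, ha⟩ := hsuf
      have hs : s = a ++ '-' :: t := by rw [← ha]
      rw [hs, pvSplitOn_append, pvSplitOn_single t hd]
      have ha' := List.length_pos_of_ne_nil (pvSplitOn_ne_nil a)
      constructor
      · simp only [List.length_append, List.length_cons]
        omega
      · simp
  · rintro ⟨hlen, hmem⟩
    obtain ⟨X, Y, hXY⟩ := List.append_of_mem hmem
    have hs : s = ['-'].intercalate (X ++ t :: Y) := by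
      rw [← hXY]
      exact (List.intercalate_splitOn s '-').symm
    cases Y with
    | cons y Y' =>
      cases X with
      | nil =>
        refine Or.inr (Or.inl ⟨['-'].intercalate (y :: Y'), ?_⟩)
        rw [hs]
        have h1 : (([] : List (List Char)) ++ t :: y :: Y') = t :: y :: Y' := by simp
        rw [h1, pvInter_cons₂]
        simp
      | cons x X' =>
        obtain ⟨a, b, hab⟩ := pvInterMid X' x t (y :: Y') (List.cons_ne_nil y Y')
        refine Or.inl ⟨a, b, ?_⟩
        rw [hs, hab]
        simp
    | nil =>
      cases X with
      | nil =>
        rw [hXY] at hlen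
        simp at hlen
      | cons x X' =>
        obtain ⟨a, ha⟩ := pvInterLast X' x t
        refine Or.inr (Or.inr ⟨a, ?_⟩)
        rw [hs, ha]

theorem pvLangCond (t : List Char) (hd : '-' ∉ t) (s : List Char) :
    (PySem.Chars.isIn ('-' :: (t ++ ['-'])) s || PySem.Chars.startswith s (t ++ ['-']))
      = (List.splitOn '-' s).dropLast.contains t := by
  rw [Bool.eq_iff_iff]
  simp only [Bool.or_eq_true, PySem.Chars.isIn_iff_infix, PySem.Chars.startswith_iff,
    List.contains_iff_mem]
  exact pvFormsLang t hd s

theorem pvWorkCond (t : List Char) (hd : '-' ∉ t) (s : List Char) :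
    (PySem.Chars.isIn ('-' :: (t ++ ['-'])) s || PySem.Chars.startswith s (t ++ ['-'])
        || PySem.Chars.endswith s ('-' :: t))
      = (decide (1 < (List.splitOn '-' s).length) && (List.splitOn '-' s).contains t) := by
  rw [Bool.eq_iff_iff]
  simp only [Bool.or_eq_true, Bool.and_eq_true, decide_eq_true_eq,
    PySem.Chars.isIn_iff_infix, PySem.Chars.startswith_iff, PySem.Chars.endswith_iff,
    List.contains_iff_mem]
  rw [or_assoc]
  exact pvFormsWork t hd s

theorem pvFindCongr {α : Type} (p q : α → Bool) (l : List α) (h : ∀ x ∈ l, p x = q x) :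
    l.find? p = l.find? q := by
  induction l with
  | nil => rfl
  | cons x xs ih =>
    have hx := h x (List.mem_cons_self ..)
    simp only [List.find?, hx]
    cases q x
    · exact ih fun y hy => h y (List.mem_cons_of_mem _ hy)
    · rfl

-- ===== VERDICT (by name: the statement is the Claim_ definition above) =====
theorem get_workload_and_lang_spec : Claim_equal_get_workload_and_lang := by
  intro wn _
  unfold Spec_get_workload_and_lang
  simp only [get_workload_and_lang, get_workload_and_lang_alt]
  rw [pvSplitOnEq, pvSliceDropLast]
  have hlang :
      (["c", "go", "py", "rust"].find? (fun l =>
        PySem.Chars.isIn ('-' :: (l.toList ++ ['-'])) wn.toList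
          || PySem.Chars.startswith wn.toList (l.toList ++ ['-'])))
      = (["c", "go", "py", "rust"].find? (fun l =>
        (List.splitOn '-' wn.toList).dropLast.contains l.toList)) := by
    apply pvFindCongr
    intro x hx
    simp only [List.mem_cons, List.not_mem_nil, or_false] at hx
    rcases hx with rfl | rfl | rfl | rfl <;> exact pvLangCond _ (by decide) _
  have hwork :
      (["sort", "copyfile", "sudoku", "graph", "fileserver", "without", "simd"].find? (fun w =>
        PySem.Chars.isIn ('-' :: (w.toList ++ ['-'])) wn.toList
          || PySem.Chars.startswith wn.toList (w.toList ++ ['-'])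
          || PySem.Chars.endswith wn.toList ('-' :: w.toList)))
      = (if 1 < (List.splitOn '-' wn.toList).length then
          ["sort", "copyfile", "sudoku", "graph", "fileserver", "without", "simd"].find? (fun w =>
            (List.splitOn '-' wn.toList).contains w.toList)
         else none) := by
    rw [pvFindCongr _ (fun w =>
        decide (1 < (List.splitOn '-' wn.toList).length)
          && (List.splitOn '-' wn.toList).contains w.toList) _ ?_]
    · by_cases h1 : 1 < (List.splitOn '-' wn.toList).length
      · simp [h1]
      · simp [h1, List.find?]
    · intro x hx
      simp only [List.mem_cons, List.not_mem_nil, or_false] at hx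
      rcases hx with rfl | rfl | rfl | rfl | rfl | rfl | rfl <;> exact pvWorkCond _ (by decide) _
  rw [hlang, hwork]
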